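-- pv_equiv track=rewrite | github.com/hjcarpenter/CS1.2_Project | Pyton_Plotting/Chromosome_GC_plot_final.py | route_track
-- ===== SOURCE A (Python) =====
-- TRACK_FLAGS = {
--     "middle": {"virulence", "amr", "cds"},
--     "outer": set(),
-- }
--
-- EXCLUDE_FLAGS = {
--     "promoter", "attc", "atti", "integrase", "sorf", "oric", "orit",
--     "crispr", "crispr-repeat", "crispr-spacer", "inverted repeat",
--     "is_ir", "ncrna", "ncrna-region", "rrna", "tmrna", "trna"
-- }
--
-- DEFAULT_TRACK = "skip"
--
-- def route_track(flag: str) -> str: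
--     """Return which track a feature goes to: inner/middle/outer/skip."""
--     if flag is None:
--         return DEFAULT_TRACK
--     f = str(flag).strip().lower()
--     if f in EXCLUDE_FLAGS:
--         return "skip"
--     for track, flags in TRACK_FLAGS.items():
--         if f in {x.lower() for x in flags}:
--             return track
--     return DEFAULT_TRACK
-- ===== SOURCE B (Python) =====
-- TRACK_FLAGS = {
--     "middle": {"virulence", "amr", "cds"},
--     "outer": set(),
-- }
--
-- EXCLUDE_FLAGS = {
--     "promoter", "attc", "atti", "integrase", "sorf", "oric", "orit",
--     "crispr", "crispr-repeat", "crispr-spacer", "inverted repeat",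
--     "is_ir", "ncrna", "ncrna-region", "rrna", "tmrna", "trna"
-- }
--
-- DEFAULT_TRACK = "skip"
--
-- # Reverse index built once: lowercased flag -> track. Excluded and unknown
-- # flags both fall through to DEFAULT_TRACK ("skip"), so no per-call scanning.
-- LOOKUP = {}
-- for _track, _flags in TRACK_FLAGS.items():
--     for _x in _flags:
--         LOOKUP[_x.lower()] = _track
--
-- def route_track(flag: str) -> str:
--     """Return which track a feature goes to: inner/middle/outer/skip."""
--     if flag is None:
--         return DEFAULT_TRACK
--     f = str(flag).strip().lower()
--     return LOOKUP.get(f, DEFAULT_TRACK)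
-- ===== Notes on version B (the rewrite author's own statement) =====
-- stated objective: simpler
-- what changed: Replaces the per-call EXCLUDE_FLAGS membership test and the loop over TRACK_FLAGS (with a lowered set rebuilt each pass) by a single module-level reverse-index dict from lowercased flag to track, queried once with the default track as fallback.
import Mathlib
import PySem

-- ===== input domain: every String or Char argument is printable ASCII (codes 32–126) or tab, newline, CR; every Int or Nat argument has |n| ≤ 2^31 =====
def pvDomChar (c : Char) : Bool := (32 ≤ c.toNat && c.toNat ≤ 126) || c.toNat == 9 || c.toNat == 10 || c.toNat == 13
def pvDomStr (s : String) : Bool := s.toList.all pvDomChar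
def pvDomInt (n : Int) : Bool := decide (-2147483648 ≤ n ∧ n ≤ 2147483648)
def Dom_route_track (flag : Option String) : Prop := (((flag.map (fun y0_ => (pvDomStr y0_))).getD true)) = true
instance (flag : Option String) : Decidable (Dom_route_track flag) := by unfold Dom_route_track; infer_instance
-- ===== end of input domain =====

-- B replaces A's exclude-set check plus per-track loop with one precomputed flag->track dict lookup (simpler; same cost class).

-- ===== PORT A =====
def pvTrackFlags : PySem.Dict String (PySem.Set String) :=
  PySem.Dict.ofList
    [("middle", PySem.Set.ofList ["virulence", "amr", "cds"]),
     ("outer", PySem.Set.ofList [])]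

def pvExcludeFlags : PySem.Set String :=
  PySem.Set.ofList
    ["promoter", "attc", "atti", "integrase", "sorf", "oric", "orit",
     "crispr", "crispr-repeat", "crispr-spacer", "inverted repeat",
     "is_ir", "ncrna", "ncrna-region", "rrna", "tmrna", "trna"]

def pvDefaultTrack : String := "skip"

-- the 'for track, flags in TRACK_FLAGS.items():' loop with early return
def pvRouteLoop (f : String) : List (String × PySem.Set String) → String
  | [] => pvDefaultTrack
  | (track, flags) :: rest =>
    if PySem.Set.contains (PySem.Set.ofList (flags.map PySem.Str.lower)) f then track
    else pvRouteLoop f rest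

def route_track (flag : Option String) : String :=
  match flag with
  | none => pvDefaultTrack
  | some s =>
    let f := PySem.Str.lower (PySem.Str.strip s)
    if PySem.Set.contains pvExcludeFlags f then "skip"
    else pvRouteLoop f pvTrackFlags.items

-- ===== PORT B =====
-- LOOKUP built once by flattening TRACK_FLAGS (Source B's module-level loop)
def pvLookup : PySem.Dict String String :=
  pvTrackFlags.items.foldl
    (fun d p => p.2.foldl (fun d x => d.insert (PySem.Str.lower x) p.1) d)
    PySem.Dict.empty

def route_track_alt (flag : Option String) : String :=
  match flag with
  | none => pvDefaultTrack
  | some s =>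
    PySem.Dict.getD pvLookup (PySem.Str.lower (PySem.Str.strip s)) pvDefaultTrack

-- ===== PRECONDITION & SPEC =====
def Spec_route_track (flag : Option String) (out : String) : Prop := out = route_track_alt flag
instance (flag : Option String) (out : String) : Decidable (Spec_route_track flag out) := by unfold Spec_route_track; infer_instance

-- ===== CLAIM (what is proved, stated in full; the proofs are below) =====
def Claim_equal_route_track : Prop := ∀ (flag : Option String), Dom_route_track flag → Spec_route_track flag (route_track flag)

-- ===== LEMMAS AND PROOFS =====

-- literal facts about the constants, proved by rewriting (String kernel reduction is avoided)
theorem pv_lower_v : PySem.Str.lower "virulence" = "virulence" := by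
  rw [← String.toList_inj]
  simp [PySem.Chars.lower, PySem.Chars.lowerChar, PySem.Chars.isupper]

theorem pv_lower_a : PySem.Str.lower "amr" = "amr" := by
  rw [← String.toList_inj]
  simp [PySem.Chars.lower, PySem.Chars.lowerChar, PySem.Chars.isupper]

theorem pv_lower_c : PySem.Str.lower "cds" = "cds" := by
  rw [← String.toList_inj]
  simp [PySem.Chars.lower, PySem.Chars.lowerChar, PySem.Chars.isupper]

theorem pv_items : pvTrackFlags.items =
    [("middle", ["virulence", "amr", "cds"]), ("outer", [])] := by
  simp [pvTrackFlags, PySem.Dict.ofList, PySem.Dict.update, PySem.Dict.insert,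
    PySem.Dict.empty, PySem.Set.ofList, PySem.Set.add, PySem.Dict.contains, List.foldl]

theorem pv_lookup_val :
    pvLookup = PySem.Dict.mk [("virulence", "middle"), ("amr", "middle"), ("cds", "middle")] := by
  unfold pvLookup
  rw [pv_items]
  simp [List.foldl, PySem.Dict.insert, PySem.Dict.empty, PySem.Dict.contains,
    pv_lower_v, pv_lower_a, pv_lower_c]

-- both bodies agree on the normalized string: case split on the three mapped flags
theorem pv_body_eq (f : String) :
    (if PySem.Set.contains pvExcludeFlags f then "skip"
     else pvRouteLoop f pvTrackFlags.items)
    = PySem.Dict.getD pvLookup f pvDefaultTrack := by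
  rw [pv_lookup_val]
  by_cases h1 : f = "virulence"
  · subst h1
    rw [pv_items]
    simp [pvExcludeFlags, PySem.Set.ofList, PySem.Set.add, PySem.Set.contains,
      pvRouteLoop, pv_lower_v, pv_lower_a, pv_lower_c, PySem.Dict.getD,
      PySem.Dict.get?_mk_cons, pvDefaultTrack]
  by_cases h2 : f = "amr"
  · subst h2
    rw [pv_items]
    simp [pvExcludeFlags, PySem.Set.ofList, PySem.Set.add, PySem.Set.contains,
      pvRouteLoop, pv_lower_v, pv_lower_a, pv_lower_c, PySem.Dict.getD,
      PySem.Dict.get?_mk_cons, pvDefaultTrack]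
  by_cases h3 : f = "cds"
  · subst h3
    rw [pv_items]
    simp [pvExcludeFlags, PySem.Set.ofList, PySem.Set.add, PySem.Set.contains,
      pvRouteLoop, pv_lower_v, pv_lower_a, pv_lower_c, PySem.Dict.getD,
      PySem.Dict.get?_mk_cons, pvDefaultTrack]
  have hr : PySem.Dict.getD
      (PySem.Dict.mk [("virulence", "middle"), ("amr", "middle"), ("cds", "middle")])
      f pvDefaultTrack = "skip" := by
    simp [PySem.Dict.getD, PySem.Dict.get?,
      Ne.symm h1, Ne.symm h2, Ne.symm h3, pvDefaultTrack]
  rw [hr]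
  by_cases he : PySem.Set.contains pvExcludeFlags f
  · rw [if_pos he]
  · rw [if_neg he, pv_items]
    simp [pvRouteLoop, PySem.Set.ofList, PySem.Set.add, PySem.Set.contains,
      pv_lower_v, pv_lower_a, pv_lower_c, pvDefaultTrack, h1, h2, h3]

-- ===== VERDICT (by name: the statement is the Claim_ definition above) =====
theorem route_track_spec : Claim_equal_route_track := by
  intro flag _
  unfold Spec_route_track route_track route_track_alt
  cases flag with
  | none => rfl
  | some s => exact pv_body_eq _
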